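-- pv_equiv track=rewrite | github.com/carlKe1/python-execise-2 | chapter eight- ex list/8.1.py | count_articles
-- ===== SOURCE A (Python) =====
-- def count_articles(text):
--     # Convert the text to lowercase to make the comparison case-insensitive
--     text = text.lower()
--     # Split the text into words
--     words = text.split()
--
--     # Define a list of articles
--     articles = ['a', 'an', 'the']
--
--     # Initialize a counter for articles
--     article_count = 0
--
--     # Iterate through the words and count the articles
--     for word in words:
--         if word in articles:
--             article_count += 1
--
--     return article_count
-- ===== SOURCE B (Python) =====
-- def count_articles(text):
--     # Loop over the three articles (not over the words): sum a full count-scan per article.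
--     words = text.lower().split()
--     return sum(words.count(article) for article in ('a', 'an', 'the'))
-- ===== Notes on version B (the rewrite author's own statement) =====
-- stated objective: alternative
-- what changed: Interchanges the loops: instead of one pass over the words with a membership branch, B loops over the three articles and sums a full words.count scan for each, so no per-word conditional exists.
import Mathlib
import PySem

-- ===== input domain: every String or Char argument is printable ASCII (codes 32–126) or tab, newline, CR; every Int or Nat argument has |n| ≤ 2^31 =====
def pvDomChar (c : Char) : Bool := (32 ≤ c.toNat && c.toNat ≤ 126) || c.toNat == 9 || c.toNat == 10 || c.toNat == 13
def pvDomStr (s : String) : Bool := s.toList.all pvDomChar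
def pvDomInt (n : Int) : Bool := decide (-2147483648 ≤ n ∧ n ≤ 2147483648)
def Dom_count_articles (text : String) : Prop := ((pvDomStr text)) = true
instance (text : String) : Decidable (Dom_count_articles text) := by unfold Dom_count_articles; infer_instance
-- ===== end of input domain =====

-- ===== PORT A =====
def count_articles (text : String) : Int :=
  let text := PySem.Str.lower text
  let words := PySem.Str.split₀ text
  let articles : List String := ["a", "an", "the"]
  words.foldl (fun article_count word =>
    if articles.contains word then article_count + 1 else article_count) 0

-- ===== PORT B =====
-- B loops over the three articles and sums words.count(article) for each (loop interchange).
def count_articles_alt (text : String) : Int :=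
  let words := PySem.Str.split₀ (PySem.Str.lower text)
  (["a", "an", "the"].map (fun article => (PySem.List.count words article : Int))).sum

-- ===== PRECONDITION & SPEC =====
def Spec_count_articles (text : String) (out : Int) : Prop := out = count_articles_alt text
instance (text : String) (out : Int) : Decidable (Spec_count_articles text out) := by unfold Spec_count_articles; infer_instance

-- ===== CLAIM (what is proved, stated in full; the proofs are below) =====
def Claim_equal_count_articles : Prop := ∀ (text : String), Dom_count_articles text → Spec_count_articles text (count_articles text)

-- ===== LEMMAS AND PROOFS =====

-- ===== VERDICT (by name: the statement is the Claim_ definition above) =====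
lemma countP_articles (ws : List String) :
    (ws.countP (fun w => (["a", "an", "the"] : List String).contains w) : Int) =
      (ws.count "a" : Int) + ((ws.count "an" : Int) + ((ws.count "the" : Int) + 0)) := by
  induction ws with
  | nil => simp
  | cons w ws ih =>
    by_cases h1 : w = "a" <;> by_cases h2 : w = "an" <;> by_cases h3 : w = "the" <;>
      simp_all <;> omega

theorem count_articles_spec : Claim_equal_count_articles := by
  intro text _
  unfold Spec_count_articles count_articles count_articles_alt
  simp only [PySem.List.foldl_if_add_one, PySem.List.count, List.map, List.sum_cons,
    List.sum_nil, zero_add]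
  exact countP_articles _
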